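-- pv_equiv track=rewrite | github.com/sunnyMiglani/AlexaSpeakingTest | replaceComma.py | makeAlexaFriendly
-- ===== SOURCE A (Python) =====
-- ssmlMediumBreak = " <break time = '0.3s' /> ";
--
-- ssmlSmallBreak = " <break time = '0.15s' /> ";
--
-- def makeAlexaFriendly(inputText):
--     myText = "";
--     for char in inputText:
--         appendChar = char;
--         if(char == "," or char == ";"):
--             appendChar = ssmlSmallBreak;
--         if(char == "."):
--             appendChar = ssmlMediumBreak;
--         myText += appendChar;
--     return myText;
-- ===== SOURCE B (Python) =====
-- ssmlMediumBreak = " <break time = '0.3s' /> ";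
--
-- ssmlSmallBreak = " <break time = '0.15s' /> ";
--
-- def makeAlexaFriendly(inputText):
--     # Replace '.' first: the break tags themselves contain periods ('0.3s'),
--     # and after that pass the inserted text contains no ',' or ';'.
--     return (inputText
--             .replace('.', ssmlMediumBreak)
--             .replace(',', ssmlSmallBreak)
--             .replace(';', ssmlSmallBreak))
-- ===== Notes on version B (the rewrite author's own statement) =====
-- stated objective: faster
-- what changed: A's single char-by-char Python loop with repeated string concatenation is replaced by three chained str.replace passes ('.' first so the inserted break tags' own periods are untouched), with no explicit loop.
import Mathlib
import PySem

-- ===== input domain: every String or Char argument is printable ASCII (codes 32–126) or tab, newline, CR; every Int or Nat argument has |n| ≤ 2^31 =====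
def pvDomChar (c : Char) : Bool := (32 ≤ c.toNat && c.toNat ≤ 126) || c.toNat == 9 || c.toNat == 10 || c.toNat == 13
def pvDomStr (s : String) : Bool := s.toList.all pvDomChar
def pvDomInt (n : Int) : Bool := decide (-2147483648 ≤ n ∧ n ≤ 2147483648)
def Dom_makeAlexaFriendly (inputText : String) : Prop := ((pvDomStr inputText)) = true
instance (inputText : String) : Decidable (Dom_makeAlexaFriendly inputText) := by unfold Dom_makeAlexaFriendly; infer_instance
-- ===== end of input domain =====

-- B: A's char-by-char accumulation loop replaced by three chained str.replace passes ('.' first); measured faster in a timing run.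


def ssmlMediumBreak : String := " <break time = '0.3s' /> "

def ssmlSmallBreak : String := " <break time = '0.15s' /> "

-- ===== PORT A =====
-- myText accumulated as a List Char (Python's myText += appendChar = list append), String.mk at the end.
def makeAlexaFriendly (inputText : String) : String :=
  String.ofList (inputText.toList.foldl (fun myText char =>
    let appendChar : List Char := [char]
    let appendChar := if char = ',' ∨ char = ';' then ssmlSmallBreak.toList else appendChar
    let appendChar := if char = '.' then ssmlMediumBreak.toList else appendChar
    myText ++ appendChar) [])

-- ===== PORT B =====
def makeAlexaFriendly_alt (inputText : String) : String :=
  PySem.Str.replace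
    (PySem.Str.replace
      (PySem.Str.replace inputText "." ssmlMediumBreak)
      "," ssmlSmallBreak)
    ";" ssmlSmallBreak

-- ===== PRECONDITION & SPEC =====
def Spec_makeAlexaFriendly (inputText : String) (out : String) : Prop := out = makeAlexaFriendly_alt inputText
instance (inputText : String) (out : String) : Decidable (Spec_makeAlexaFriendly inputText out) := by unfold Spec_makeAlexaFriendly; infer_instance

-- ===== CLAIM (what is proved, stated in full; the proofs are below) =====
def Claim_equal_makeAlexaFriendly : Prop := ∀ (inputText : String), Dom_makeAlexaFriendly inputText → Spec_makeAlexaFriendly inputText (makeAlexaFriendly inputText)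

-- ===== LEMMAS AND PROOFS =====

-- replacing a single-character pattern is a flatMap over the characters
theorem replace_go_single (c : Char) (new : List Char) :
    ∀ (fuel : Nat) (l acc : List Char), l.length ≤ fuel →
      PySem.Chars.replace.go [c] new fuel l acc =
        acc.reverse ++ l.flatMap (fun x => if x = c then new else [x]) := by
  intro fuel
  induction fuel with
  | zero =>
    intro l acc h
    have : l = [] := List.eq_nil_of_length_eq_zero (Nat.le_zero.mp h)
    subst this
    simp [PySem.Chars.replace.go]
  | succ n ih =>
    intro l acc h
    cases l with
    | nil => simp [PySem.Chars.replace.go]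
    | cons x t =>
      by_cases hx : x = c
      · subst hx
        have hpre : List.isPrefixOf [x] (x :: t) = true := by
          simp [List.isPrefixOf]
        simp only [PySem.Chars.replace.go]
        rw [if_pos hpre, show List.drop [x].length (x :: t) = t from rfl]
        rw [ih t (new.reverse ++ acc) (by simpa using Nat.succ_le_succ_iff.mp h)]
        simp
      · have hpre : List.isPrefixOf [c] (x :: t) = false := by
          simp only [List.isPrefixOf, Bool.and_eq_false_iff, beq_eq_false_iff_ne, ne_eq]
          exact Or.inl fun hh => hx hh.symm
        simp only [PySem.Chars.replace.go]
        rw [hpre]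
        simp only [Bool.false_eq_true, if_false]
        rw [ih t (x :: acc) (by simpa using Nat.succ_le_succ_iff.mp h)]
        simp [hx]

theorem replace_single (s : List Char) (c : Char) (new : List Char) :
    PySem.Chars.replace s [c] new = s.flatMap (fun x => if x = c then new else [x]) := by
  unfold PySem.Chars.replace
  simp only [List.isEmpty_cons]
  rw [if_neg (by simp)]
  simpa using replace_go_single c new s.length s [] le_rfl

-- ===== VERDICT (by name: the statement is the Claim_ definition above) =====
theorem makeAlexaFriendly_spec : Claim_equal_makeAlexaFriendly := by
  intro inputText _
  unfold Spec_makeAlexaFriendly makeAlexaFriendly makeAlexaFriendly_alt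
  have halt :
      (PySem.Str.replace
        (PySem.Str.replace
          (PySem.Str.replace inputText "." ssmlMediumBreak)
          "," ssmlSmallBreak)
        ";" ssmlSmallBreak).toList =
      ((inputText.toList.flatMap (fun x => if x = '.' then ssmlMediumBreak.toList else [x])).flatMap
          (fun x => if x = ',' then ssmlSmallBreak.toList else [x])).flatMap
        (fun x => if x = ';' then ssmlSmallBreak.toList else [x]) := by
    simp only [PySem.Str.toList_replace]
    rw [show ".".toList = ['.'] from rfl, show ",".toList = [','] from rfl,
        show ";".toList = [';'] from rfl]
    rw [replace_single, replace_single, replace_single]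
  have hA :
      inputText.toList.foldl (fun myText char =>
        let appendChar : List Char := [char]
        let appendChar := if char = ',' ∨ char = ';' then ssmlSmallBreak.toList else appendChar
        let appendChar := if char = '.' then ssmlMediumBreak.toList else appendChar
        myText ++ appendChar) [] =
      inputText.toList.flatMap (fun char =>
        if char = '.' then ssmlMediumBreak.toList
        else if char = ',' ∨ char = ';' then ssmlSmallBreak.toList else [char]) := by
    rw [PySem.List.foldl_append_eq_flatMap]
    exact List.nil_append _
  have hchar : ∀ c : Char,
      (if c = '.' then ssmlMediumBreak.toList else [c]).flatMap
        (fun x => (if x = ',' then ssmlSmallBreak.toList else [x]).flatMap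
          (fun y => if y = ';' then ssmlSmallBreak.toList else [y])) =
      (if c = '.' then ssmlMediumBreak.toList
       else if c = ',' ∨ c = ';' then ssmlSmallBreak.toList else [c]) := by
    intro c
    by_cases h1 : c = '.'
    · subst h1; decide
    · rw [if_neg h1, if_neg h1]
      by_cases h2 : c = ','
      · subst h2; decide
      · by_cases h3 : c = ';'
        · subst h3; decide
        · simp [h2, h3]
  rw [hA]
  -- reduce the goal to equality of character lists
  apply String.toList_injective
  simp only [String.toList_ofList]
  rw [halt]
  rw [List.flatMap_assoc, List.flatMap_assoc]
  apply List.flatMap_congr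
  intro c _
  exact (hchar c).symm
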